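-- pv_equiv track=rewrite | github.com/MrIsaar/MachineLearning | playground.py | looppermk
-- ===== SOURCE A (Python) =====
-- def createArray(size,zero=False,transposed = False):
--     arr = []
--     if transposed:
--         for i in range(0,size):
--             arrinner = []
--             for j in range(0,size):
--                 if zero:
--                     arrinner.append(0)
--                 else:
--                     arrinner.append(j + i+1)
--             arr.append(arrinner)
--         return arr
--     for i in range(0,size):
--         arrinner = []
--         for j in range(0,size):
--             if zero:
--                 arrinner.append(0)
--             else:
--                 arrinner.append(j + i+1)
--         arr.append(arrinner)
--     return arr
--
-- def looppermk(size=512):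
--
--     a = createArray(size)
--     b = createArray(size,transposed=True)
--     c = createArray(size,True)
--
--     for i in range(0,size):
--         for j in range(0,size):
--             rem = (size - j) % 3
--             for k in range (j,j+rem):
--                 c[i][j] += a[i][k]*b[k][j]
--             for k in range(j+rem,size,3): #i = val,k occurs val  0,1 1,2 2,3
--                 c[i][j] += a[i][k]*b[k][j] + a[i][k+1]*b[k+1][j] + a[i][k+2]*b[k+2][j]
--     return c
-- ===== SOURCE B (Python) =====
-- def looppermk(size=512):
--     # Closed form per entry: A computes c[i][j] = sum_{k=j}^{size-1} (i+k+1)*(k+j+1);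
--     # use t1(b)=2*sum_{k<b}k and t2(b)=6*sum_{k<b}k^2 to evaluate it in O(1) per entry.
--     def t1(b):
--         return b * (b - 1)
--     def t2(b):
--         return b * (b - 1) * (2 * b - 1)
--     c = []
--     for i in range(size):
--         row = []
--         for j in range(size):
--             s1 = (t1(size) - t1(j)) // 2
--             s2 = (t2(size) - t2(j)) // 6
--             row.append(s2 + (i + j + 2) * s1 + (i + 1) * (j + 1) * (size - j))
--         c.append(row)
--     return c
-- ===== Notes on version B (the rewrite author's own statement) =====
-- stated objective: faster
-- what changed: B replaces A's triple nested loop (with manual 3-way unrolling) by a closed-form O(1) evaluation of each entry c[i][j] = sum_{k=j}^{size-1} (i+k+1)*(k+j+1) via the Sum(k) and Sum(k^2) formulas, and drops the helper matrices entirely.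
import Mathlib
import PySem

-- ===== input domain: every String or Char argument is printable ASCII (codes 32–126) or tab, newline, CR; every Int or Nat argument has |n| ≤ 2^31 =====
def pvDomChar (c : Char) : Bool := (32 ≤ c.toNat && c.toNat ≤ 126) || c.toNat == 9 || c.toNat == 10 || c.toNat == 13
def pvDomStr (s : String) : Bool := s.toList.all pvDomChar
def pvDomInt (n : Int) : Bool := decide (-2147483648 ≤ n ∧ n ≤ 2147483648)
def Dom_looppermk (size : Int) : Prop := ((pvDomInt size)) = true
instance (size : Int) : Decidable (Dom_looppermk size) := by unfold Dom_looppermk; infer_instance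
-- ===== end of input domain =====

-- B replaces A's O(n^3) unrolled triple loop by a closed-form O(1) evaluation of each entry
-- c[i][j] = sum_{k=j}^{n-1} (i+k+1)*(k+j+1) using the Σk and Σk² formulas (objective: faster).

-- ===== PORT A =====
-- createArray(size, zero, transposed); the two branches of the Python `if transposed` carry
-- identical copies of the same loop, transcribed as such.
def pvCreateArray (size : Int) (zero : Bool) (transposed : Bool) : List (List Int) :=
  if transposed then
    (PySem.List.pyRange 0 size 1).foldl (fun arr i =>
      arr ++ [(PySem.List.pyRange 0 size 1).foldl
        (fun inner j => inner ++ [if zero then 0 else j + i + 1]) []]) []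
  else
    (PySem.List.pyRange 0 size 1).foldl (fun arr i =>
      arr ++ [(PySem.List.pyRange 0 size 1).foldl
        (fun inner j => inner ++ [if zero then 0 else j + i + 1]) []]) []

-- m[i][k] read; every access in A has 0 ≤ i,k < size (loop bounds), so getD with defaults is exact there.
def pvGet2 (m : List (List Int)) (i k : Int) : Int :=
  PySem.List.pyGetD (PySem.List.pyGetD m i []) k 0

-- c[i][j] += v; indices are always nonnegative and in range in A.
def pvAdd2 (c : List (List Int)) (i j : Int) (v : Int) : List (List Int) :=
  c.modify i.toNat (fun row => row.modify j.toNat (fun x => x + v))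

def looppermk (size : Int) : List (List Int) :=
  let a := pvCreateArray size false false
  let b := pvCreateArray size false true
  let c := pvCreateArray size true false
  (PySem.List.pyRange 0 size 1).foldl (fun c i =>
    (PySem.List.pyRange 0 size 1).foldl (fun c j =>
      let rem := PySem.Int.mod (size - j) 3
      let c := (PySem.List.pyRange j (j + rem) 1).foldl
        (fun c k => pvAdd2 c i j (pvGet2 a i k * pvGet2 b k j)) c
      (PySem.List.pyRange (j + rem) size 3).foldl
        (fun c k => pvAdd2 c i j (pvGet2 a i k * pvGet2 b k j
          + pvGet2 a i (k + 1) * pvGet2 b (k + 1) j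
          + pvGet2 a i (k + 2) * pvGet2 b (k + 2) j)) c) c) c

-- ===== PORT B =====
def pvT1 (b : Int) : Int := b * (b - 1)

def pvT2 (b : Int) : Int := b * (b - 1) * (2 * b - 1)

def looppermk_alt (size : Int) : List (List Int) :=
  (PySem.List.pyRange 0 size 1).foldl (fun c i =>
    c ++ [(PySem.List.pyRange 0 size 1).foldl (fun row j =>
      row ++ [PySem.Int.floordiv (pvT2 size - pvT2 j) 6
        + (i + j + 2) * PySem.Int.floordiv (pvT1 size - pvT1 j) 2
        + (i + 1) * (j + 1) * (size - j)]) []]) []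

-- ===== PRECONDITION & SPEC =====
def Spec_looppermk (size : Int) (out : List (List Int)) : Prop := out = looppermk_alt size
instance (size : Int) (out : List (List Int)) : Decidable (Spec_looppermk size out) := by unfold Spec_looppermk; infer_instance

-- ===== CLAIM (what is proved, stated in full; the proofs are below) =====
def Claim_equal_looppermk : Prop := ∀ (size : Int), Dom_looppermk size → Spec_looppermk size (looppermk size)

-- ===== LEMMAS AND PROOFS =====

-- The closed-form entry that B computes at (i, j).
def pvEnt (n i j : Int) : Int :=
  PySem.Int.floordiv (pvT2 n - pvT2 j) 6
    + (i + j + 2) * PySem.Int.floordiv (pvT1 n - pvT1 j) 2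
    + (i + 1) * (j + 1) * (n - j)

theorem pv_modify_modify {α : Type} (l : List α) (i : Nat) (f g : α → α) :
    (l.modify i f).modify i g = l.modify i (fun x => g (f x)) := by
  apply List.ext_getElem?
  intro t
  simp only [List.getElem?_modify]
  cases l[t]? with
  | none => simp
  | some v => by_cases hit : i = t <;> simp [hit]

theorem pv_add2_add2 (c : List (List Int)) (i j u v : Int) :
    pvAdd2 (pvAdd2 c i j u) i j v = pvAdd2 c i j (u + v) := by
  unfold pvAdd2
  rw [pv_modify_modify]
  congr 1
  funext row
  rw [pv_modify_modify]
  congr 1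
  funext x
  ring

theorem pv_add2_zero (c : List (List Int)) (i j : Int) :
    pvAdd2 c i j 0 = c := by
  unfold pvAdd2
  have h1 : (fun x : Int => x + 0) = id := by funext x; simp
  rw [h1]
  simp only [List.modify_id]
  exact List.modify_id _ _

theorem pv_foldl_add2_sum (i j : Int) (g : Int → Int) :
    ∀ (ks : List Int) (c : List (List Int)),
    ks.foldl (fun c k => pvAdd2 c i j (g k)) c = pvAdd2 c i j ((ks.map g).sum) := by
  intro ks
  induction ks with
  | nil => intro c; simp [pv_add2_zero]
  | cons k t ih => intro c; simp [ih, pv_add2_add2]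

theorem pv_foldl_modify_fold {α β : Type} (i : Nat) (h : β → α → α) :
    ∀ (js : List β) (c : List α),
    js.foldl (fun c j => c.modify i (h j)) c
      = c.modify i (fun r => js.foldl (fun r j => h j r) r) := by
  intro js
  induction js with
  | nil => intro c; exact (List.modify_id _ _).symm
  | cons j t ih => intro c; simp only [List.foldl_cons, ih, pv_modify_modify]

theorem pv_foldl_modify_range {α : Type} (G : Nat → α → α) :
    ∀ (m : Nat) (c : List α) (t : Nat),
    getElem? ((List.range m).foldl (fun c i => c.modify i (G i)) c) t
      = if t < m then (getElem? c t).map (G t) else getElem? c t := by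
  intro m
  induction m with
  | zero => intro c t; simp
  | succ m ih =>
    intro c t
    rw [List.range_succ, List.foldl_append]
    simp only [List.foldl_cons, List.foldl_nil, List.getElem?_modify, ih]
    rcases Nat.lt_trichotomy t m with h | h | h
    · have h1 : t < m + 1 := by omega
      have h2 : m ≠ t := by omega
      simp [h, h1, h2]
    · subst h
      have h1 : ¬ (t < t) := by omega
      have h2 : t < t + 1 := by omega
      simp [h1, h2]
    · have h1 : ¬ (t < m) := by omega
      have h2 : ¬ (t < m + 1) := by omega
      have h3 : m ≠ t := by omega
      simp [h1, h2, h3]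

theorem pv_foldl_modify_map {α : Type} (G : Nat → α → α) (g : Nat → α) (m : Nat) :
    (List.range m).foldl (fun c i => c.modify i (G i)) ((List.range m).map g)
      = (List.range m).map (fun i => G i (g i)) := by
  apply List.ext_getElem?
  intro t
  rw [pv_foldl_modify_range]
  by_cases h : t < m
  · simp [h]
  · have h2 : m ≤ t := by omega
    rw [if_neg h, List.getElem?_eq_none (by simpa using h2 :
          ((List.range m).map g).length ≤ t),
      List.getElem?_eq_none (by simpa using h2 :
          ((List.range m).map (fun i => G i (g i))).length ≤ t)]

theorem pv_createArray_eq (n : Int) (zero transposed : Bool) :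
    pvCreateArray n zero transposed
      = (PySem.List.pyRange 0 n 1).map (fun i =>
          (PySem.List.pyRange 0 n 1).map (fun j => if zero then 0 else j + i + 1)) := by
  cases transposed <;>
    · unfold pvCreateArray
      simp only [Bool.false_eq_true, if_false, if_true,
        PySem.List.foldl_append_singleton_eq_map, List.nil_append]

theorem pv_get2_eq (n i k : Int) (zero transposed : Bool)
    (hi0 : 0 ≤ i) (hin : i < n) (hk0 : 0 ≤ k) (hkn : k < n) :
    pvGet2 (pvCreateArray n zero transposed) i k = if zero then 0 else k + i + 1 := by
  rw [pv_createArray_eq, pvGet2,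
    PySem.List.pyGetD_map_pyRange_of_nonneg _ n i _ hi0 hin,
    PySem.List.pyGetD_map_pyRange_of_nonneg _ n k _ hk0 hkn]

-- dividing the exact multiples that B's `//` sees
theorem pv_dvd_t1 (a b : Int) : (2 : Int) ∣ (pvT1 b - pvT1 a) := by
  have hb : (2:Int) ∣ pvT1 b := by
    have := Int.even_mul_succ_self (b - 1)
    simpa [pvT1, mul_comm, sub_add_cancel] using this.two_dvd
  have ha : (2:Int) ∣ pvT1 a := by
    have := Int.even_mul_succ_self (a - 1)
    simpa [pvT1, mul_comm, sub_add_cancel] using this.two_dvd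
  exact Int.dvd_sub hb ha

theorem pv_dvd_t2_single (b : Int) : (6 : Int) ∣ pvT2 b := by
  induction b using Int.induction_on with
  | zero => simp [pvT2]
  | succ i ih =>
    obtain ⟨q, hq⟩ := ih
    refine ⟨q + (i : Int) * i, ?_⟩
    simp only [pvT2] at hq ⊢
    linear_combination hq
  | pred i ih =>
    obtain ⟨q, hq⟩ := ih
    refine ⟨q - ((-i : Int) - 1) * ((-i : Int) - 1), ?_⟩
    simp only [pvT2] at hq ⊢
    linear_combination hq

theorem pv_dvd_t2 (a b : Int) : (6 : Int) ∣ (pvT2 b - pvT2 a) :=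
  Int.dvd_sub (pv_dvd_t2_single b) (pv_dvd_t2_single a)

-- closed form of the straight sum  Σ_{k=j}^{b-1} (k+i+1)*(j+k+1)
theorem pv_sum_closed (i j : Int) :
    ∀ (t : Nat),
    6 * (((PySem.List.pyRange j (j + t) 1).map (fun k => (k + i + 1) * (j + k + 1))).sum)
      = (pvT2 (j + t) - pvT2 j) + 3 * (i + j + 2) * (pvT1 (j + t) - pvT1 j)
        + 6 * (i + 1) * (j + 1) * ((j + t) - j) := by
  intro t
  induction t with
  | zero => simp
  | succ t ih =>
    have hle : j ≤ j + (t : Int) := by omega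
    have : (j + ((t : Nat) + 1 : Nat) : Int) = (j + t) + 1 := by push_cast; ring
    rw [this, PySem.List.pyRange_one_succ_right hle]
    simp only [List.map_append, List.sum_append, List.map_cons, List.map_nil,
      List.sum_cons, List.sum_nil]
    simp only [pvT1, pvT2] at *
    push_cast at *
    linear_combination ih

-- the unrolled step-3 loop sums the same terms as the straight loop
theorem pv_range3_cons (a b : Int) (h : a < b) :
    PySem.List.pyRange a b 3 = a :: PySem.List.pyRange (a + 3) b 3 := by
  rw [PySem.List.pyRange_of_pos a b (by norm_num),
    PySem.List.pyRange_of_pos (a + 3) b (by norm_num)]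
  have hcount : (if a < b then ((b - a + 3 - 1) / 3).toNat else 0)
      = (if a + 3 < b then ((b - (a + 3) + 3 - 1) / 3).toNat else 0) + 1 := by
    by_cases h3 : a + 3 < b <;> simp [h, h3] <;> omega
  rw [hcount, List.range_succ_eq_map]
  simp only [List.map_cons, List.map_map, Nat.cast_zero, mul_zero, add_zero]
  congr 1
  apply List.map_congr_left
  intro x _
  simp only [Function.comp_apply, Nat.cast_succ]
  ring

theorem pv_triple_merge (g : Int → Int) :
    ∀ (t : Nat) (a : Int),
    ((PySem.List.pyRange a (a + 3 * t) 3).map (fun k => g k + g (k + 1) + g (k + 2))).sum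
      = ((PySem.List.pyRange a (a + 3 * t) 1).map g).sum := by
  intro t
  induction t with
  | zero =>
    intro a
    have hnil3 : PySem.List.pyRange a a 3 = [] := by
      rw [PySem.List.pyRange_of_pos _ _ (by norm_num : (0:Int) < 3)]
      simp
    simp [hnil3, PySem.List.pyRange_one_eq_nil (le_refl a)]
  | succ t ih =>
    intro a
    have h1 : (a + 3 * ((t : Nat) + 1 : Nat) : Int) = (a + 3) + 3 * t := by push_cast; ring
    have h2 : a < (a + 3) + 3 * (t : Int) := by omega
    rw [h1, pv_range3_cons a _ h2]
    have hsplit : PySem.List.pyRange a ((a + 3) + 3 * (t : Int)) 1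
        = PySem.List.pyRange a (a + 3) 1 ++ PySem.List.pyRange (a + 3) ((a + 3) + 3 * t) 1 := by
      exact PySem.List.pyRange_one_append a (a + 3) _ (by omega) (by omega)
    rw [hsplit]
    have hthree : PySem.List.pyRange a (a + 3) 1 = [a, a + 1, a + 1 + 1] := by
      rw [PySem.List.pyRange_one_cons (by omega), PySem.List.pyRange_one_cons (by omega),
        PySem.List.pyRange_one_cons (by omega), PySem.List.pyRange_one_eq_nil (by omega)]
    rw [hthree]
    simp only [List.map_cons, List.sum_cons, List.map_append, List.sum_append,
      List.map_nil, List.sum_nil, ih]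
    ring

-- the whole body of A's j-loop collapses to one addition of B's closed-form entry
theorem pv_body_eq (n i j : Int) (hi0 : 0 ≤ i) (hin : i < n) (hj0 : 0 ≤ j) (hjn : j < n) :
    ∀ c, (let rem := PySem.Int.mod (n - j) 3
      let c2 := (PySem.List.pyRange j (j + rem) 1).foldl
        (fun c k => pvAdd2 c i j (pvGet2 (pvCreateArray n false false) i k
          * pvGet2 (pvCreateArray n false true) k j)) c
      (PySem.List.pyRange (j + rem) n 3).foldl
        (fun c k => pvAdd2 c i j (pvGet2 (pvCreateArray n false false) i k
          * pvGet2 (pvCreateArray n false true) k j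
          + pvGet2 (pvCreateArray n false false) i (k + 1)
            * pvGet2 (pvCreateArray n false true) (k + 1) j
          + pvGet2 (pvCreateArray n false false) i (k + 2)
            * pvGet2 (pvCreateArray n false true) (k + 2) j)) c2)
      = pvAdd2 c i j (pvEnt n i j) := by
  intro c
  simp only []
  set rem := PySem.Int.mod (n - j) 3 with hrem
  have hmod : rem = (n - j) % 3 := by
    rw [hrem, PySem.Int.mod_eq_emod_of_pos (by norm_num)]
  have hrb : 0 ≤ rem ∧ rem < 3 ∧ rem ≤ n - j ∧ (3 : Int) ∣ (n - j - rem) := by omega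
  obtain ⟨hr0, hr3, hrnj, hdvd⟩ := hrb
  rw [pv_foldl_add2_sum, pv_foldl_add2_sum, pv_add2_add2]
  congr 1
  -- replace the matrix reads by their values
  have hf1 : (PySem.List.pyRange j (j + rem) 1).map
      (fun k => pvGet2 (pvCreateArray n false false) i k
        * pvGet2 (pvCreateArray n false true) k j)
      = (PySem.List.pyRange j (j + rem) 1).map (fun k => (k + i + 1) * (j + k + 1)) := by
    apply List.map_congr_left
    intro k hk
    have hk' := (PySem.List.mem_pyRange_one).1 hk
    rw [pv_get2_eq n i k false false hi0 hin (by omega) (by omega),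
      pv_get2_eq n k j false true (by omega) (by omega) hj0 hjn]
    simp
  have hf2 : (PySem.List.pyRange (j + rem) n 3).map
      (fun k => pvGet2 (pvCreateArray n false false) i k
        * pvGet2 (pvCreateArray n false true) k j
        + pvGet2 (pvCreateArray n false false) i (k + 1)
          * pvGet2 (pvCreateArray n false true) (k + 1) j
        + pvGet2 (pvCreateArray n false false) i (k + 2)
          * pvGet2 (pvCreateArray n false true) (k + 2) j)
      = (PySem.List.pyRange (j + rem) n 3).map
          (fun k => (k + i + 1) * (j + k + 1) + ((k + 1) + i + 1) * (j + (k + 1) + 1)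
            + ((k + 2) + i + 1) * (j + (k + 2) + 1)) := by
    apply List.map_congr_left
    intro k hk
    have hk' := (PySem.List.mem_pyRange_iff_of_pos (by norm_num : (0:Int) < 3) k).1 hk
    obtain ⟨hk1, hk2, hk3⟩ := hk'
    have hkn3 : k + 3 ≤ n := by omega
    rw [pv_get2_eq n i k false false hi0 hin (by omega) (by omega),
      pv_get2_eq n k j false true (by omega) (by omega) hj0 hjn,
      pv_get2_eq n i (k + 1) false false hi0 hin (by omega) (by omega),
      pv_get2_eq n (k + 1) j false true (by omega) (by omega) hj0 hjn,
      pv_get2_eq n i (k + 2) false false hi0 hin (by omega) (by omega),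
      pv_get2_eq n (k + 2) j false true (by omega) (by omega) hj0 hjn]
    simp
  rw [hf1, hf2]
  -- merge the unrolled step-3 loop into a straight sum
  obtain ⟨t', ht'⟩ := hdvd
  have ht'0 : 0 ≤ t' := by omega
  have hn3 : n = (j + rem) + 3 * ((t'.toNat : Nat) : Int) := by
    rw [Int.toNat_of_nonneg ht'0]; omega
  have hmerge := pv_triple_merge (fun k => (k + i + 1) * (j + k + 1)) t'.toNat (j + rem)
  rw [← hn3] at hmerge
  have hmerge' : ((PySem.List.pyRange (j + rem) n 3).map
      (fun k => (k + i + 1) * (j + k + 1) + ((k + 1) + i + 1) * (j + (k + 1) + 1)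
        + ((k + 2) + i + 1) * (j + (k + 2) + 1))).sum
      = ((PySem.List.pyRange (j + rem) n 1).map (fun k => (k + i + 1) * (j + k + 1))).sum := by
    rw [← hmerge]
  rw [hmerge']
  -- join the two pieces into the full sum over [j, n)
  have happ : PySem.List.pyRange j n 1
      = PySem.List.pyRange j (j + rem) 1 ++ PySem.List.pyRange (j + rem) n 1 :=
    PySem.List.pyRange_one_append j (j + rem) n (by omega) (by omega)
  have hsum : ((PySem.List.pyRange j (j + rem) 1).map (fun k => (k + i + 1) * (j + k + 1))).sum
      + ((PySem.List.pyRange (j + rem) n 1).map (fun k => (k + i + 1) * (j + k + 1))).sum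
      = ((PySem.List.pyRange j n 1).map (fun k => (k + i + 1) * (j + k + 1))).sum := by
    rw [happ, List.map_append, List.sum_append]
  rw [hsum]
  -- closed form
  have hsc := pv_sum_closed i j (n - j).toNat
  have hjn' : j + ((n - j).toNat : Int) = n := by omega
  rw [hjn'] at hsc
  obtain ⟨q1, hq1⟩ := pv_dvd_t1 j n
  obtain ⟨q2, hq2⟩ := pv_dvd_t2 j n
  have hd1 : PySem.Int.floordiv (pvT1 n - pvT1 j) 2 = q1 := by
    rw [hq1, PySem.Int.floordiv_eq_ediv_of_pos (by norm_num),
      Int.mul_ediv_cancel_left q1 (by norm_num)]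
  have hd2 : PySem.Int.floordiv (pvT2 n - pvT2 j) 6 = q2 := by
    rw [hq2, PySem.Int.floordiv_eq_ediv_of_pos (by norm_num),
      Int.mul_ediv_cancel_left q2 (by norm_num)]
  rw [pvEnt, hd1, hd2]
  rw [hq1, hq2] at hsc
  linarith

-- the whole of A, after pv_body_eq: one pvAdd2 of pvEnt per (i, j)
theorem pv_looppermk_fold (n : Int) :
    looppermk n
      = (PySem.List.pyRange 0 n 1).foldl (fun c i =>
          (PySem.List.pyRange 0 n 1).foldl (fun c j => pvAdd2 c i j (pvEnt n i j)) c)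
        (pvCreateArray n true false) := by
  unfold looppermk
  apply PySem.List.foldl_congr_mem
  intro acc i hi
  apply PySem.List.foldl_congr_mem
  intro acc' j hj
  have hi' := (PySem.List.mem_pyRange_one).1 hi
  have hj' := (PySem.List.mem_pyRange_one).1 hj
  exact pv_body_eq n i j hi'.1 hi'.2 hj'.1 hj'.2 acc'

theorem pv_alt_map (n : Int) :
    looppermk_alt n
      = (PySem.List.pyRange 0 n 1).map (fun i =>
          (PySem.List.pyRange 0 n 1).map (fun j => pvEnt n i j)) := by
  unfold looppermk_alt pvEnt
  simp only [PySem.List.foldl_append_singleton_eq_map, List.nil_append]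

-- ===== VERDICT (by name: the statement is the Claim_ definition above) =====
theorem looppermk_spec : Claim_equal_looppermk := by
  intro n _
  unfold Spec_looppermk
  rw [pv_looppermk_fold, pv_alt_map, pv_createArray_eq]
  have hpy : PySem.List.pyRange 0 n 1 = (List.range n.toNat).map (fun (k : Nat) => (k : Int)) := by
    rw [PySem.List.pyRange_one]
    simp only [zero_add, sub_zero]
  rw [hpy]
  simp only [List.foldl_map, List.map_map, Function.comp, pvAdd2, Int.toNat_natCast,
    Bool.true_eq_false, if_true, if_false]
  rw [PySem.List.foldl_congr_mem _ _
      (fun (c : List (List Int)) (iN : Nat) => c.modify iN (fun r =>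
        (List.range n.toNat).foldl
          (fun r jN => r.modify jN (fun x => x + pvEnt n iN jN)) r)) _
      (fun acc iN _ => pv_foldl_modify_fold iN _ _ acc),
    pv_foldl_modify_map]
  apply List.map_congr_left
  intro iN _
  dsimp only [Function.comp]
  rw [pv_foldl_modify_map]
  apply List.map_congr_left
  intro jN _
  simp
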